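-- pv_equiv track=rewrite | github.com/giuscri/problem-solving-workout | heap.py | combine_heaps
-- ===== SOURCE A (Python) =====
-- import math
--
-- def combine_heaps(A, B):
--     if len(A)==1 and len(B)==1:
--         return A + B
--     C = []
--     i, j = 0, 0
--     for inc in [2**i for i in range(math.ceil(math.log2(len(A))) +1)]:
--         i, j = j, j+inc
--         C += A[i:j] + B[i:j]
--     return C
-- ===== SOURCE B (Python) =====
-- def combine_heaps(A, B):
--     def go(A, B, w, levels):
--         if levels == 0:
--             return []
--         return A[:w] + B[:w] + go(A[w:], B[w:], 2 * w, levels - 1)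
--     return go(A, B, 1, (len(A) - 1).bit_length() + 1)
-- ===== Notes on version B (the rewrite author's own statement) =====
-- stated objective: alternative
-- what changed: Replaces the iterative slice-index loop (powers-of-two list, threaded (i,j) state, singleton special case) by a recursion that consumes both lists level by level: emit the w-element prefixes of A and B, recurse on the suffixes with doubled width, with the level count taken from (len(A)-1).bit_length() instead of math.log2.
import Mathlib
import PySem

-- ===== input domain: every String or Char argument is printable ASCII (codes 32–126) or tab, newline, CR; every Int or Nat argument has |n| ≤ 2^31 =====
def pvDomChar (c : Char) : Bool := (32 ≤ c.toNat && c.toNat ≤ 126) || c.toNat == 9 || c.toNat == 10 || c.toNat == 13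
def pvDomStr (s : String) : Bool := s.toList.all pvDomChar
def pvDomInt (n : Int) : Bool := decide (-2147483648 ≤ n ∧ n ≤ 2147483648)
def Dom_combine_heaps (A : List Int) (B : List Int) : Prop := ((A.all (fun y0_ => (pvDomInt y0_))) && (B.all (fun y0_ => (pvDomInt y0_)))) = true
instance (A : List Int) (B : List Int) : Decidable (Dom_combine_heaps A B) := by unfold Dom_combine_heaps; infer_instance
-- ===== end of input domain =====

-- B replaces A's slice-index loop (powers-of-two list, threaded (i,j) state, singleton
-- special case) by a recursion that consumes both lists level by level with doubling
-- prefix width (objective: alternative decomposition).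


-- ===== PORT A =====
-- math.ceil(math.log2(n)) for n ≥ 1 is ported exactly as Nat.clog 2 n (exact integer
-- semantics of the ceiling base-2 logarithm; the float computation is exact on the tested sizes).
def combine_heaps (A : List Int) (B : List Int) : List Int :=
  if A.length == 1 && B.length == 1 then A ++ B
  else
    (((List.range (Nat.clog 2 A.length + 1)).map (fun k => (2:Int)^k)).foldl
      (fun (st : List Int × Int × Int) inc =>
        let i := st.2.2
        let j := st.2.2 + inc
        (st.1 ++ (PySem.List.slice A (some i) (some j) ++ PySem.List.slice B (some i) (some j)), i, j))
      ([], 0, 0)).1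

-- ===== PORT B =====
-- (len(A)-1).bit_length() is ported as ((A.length:Int)-1).natAbs.size — Python's int.bit_length
-- is the bit size of the absolute value, so this is exact for every length (including 0).
def combineGo (A : List Int) (B : List Int) (w : Nat) (levels : Nat) : List Int :=
  match levels with
  | 0 => []
  | n + 1 =>
      PySem.List.slice A none (some (w:Int)) ++ PySem.List.slice B none (some (w:Int)) ++
      combineGo (PySem.List.slice A (some (w:Int)) none) (PySem.List.slice B (some (w:Int)) none)
        (2 * w) n

def combine_heaps_alt (A : List Int) (B : List Int) : List Int :=
  combineGo A B 1 (((A.length : Int) - 1).natAbs.size + 1)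

-- ===== PRECONDITION & SPEC =====
-- A raises ValueError (math.log2(0)) when A is empty; the empty A is therefore excluded.
def Pre_combine_heaps (A : List Int) (B : List Int) : Prop := A ≠ []
instance (A : List Int) (B : List Int) : Decidable (Pre_combine_heaps A B) := by unfold Pre_combine_heaps; infer_instance
def pvWitness_combine_heaps : List Int × List Int := ([3, 1, 2], [5, 4])
def Spec_combine_heaps (A : List Int) (B : List Int) (out : List Int) : Prop := out = combine_heaps_alt A B
instance (A : List Int) (B : List Int) (out : List Int) : Decidable (Spec_combine_heaps A B out) := by unfold Spec_combine_heaps; infer_instance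

-- ===== CLAIM (what is proved, stated in full; the proofs are below) =====
def Claim_equal_combine_heaps : Prop := ∀ (A : List Int) (B : List Int), Dom_combine_heaps A B → Pre_combine_heaps A B → Spec_combine_heaps A B (combine_heaps A B)

-- ===== LEMMAS AND PROOFS =====

-- (n-1).bit_length() = ceil(log2 n) for n ≥ 1: both are the least k with n ≤ 2^k.
theorem size_pred_eq_clog (n : Nat) (h : 1 ≤ n) : (n - 1).size = Nat.clog 2 n := by
  apply le_antisymm
  · rw [Nat.size_le]
    have := Nat.le_pow_clog (b := 2) (by norm_num) n
    omega
  · rw [← Nat.le_pow_iff_clog_le (by norm_num)]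
    have := Nat.lt_size_self (n - 1)
    omega

-- Loop invariant for A's fold: after t iterations it has accumulated the flatMap of the
-- level slices [2^k-1, 2^(k+1)-1) for k < t, and j = 2^t - 1.
theorem combine_heaps_loop (A B : List Int) (t : Nat) :
    (((List.range t).map (fun k => (2:Int)^k)).foldl
      (fun (st : List Int × Int × Int) inc =>
        let i := st.2.2
        let j := st.2.2 + inc
        (st.1 ++ (PySem.List.slice A (some i) (some j) ++ PySem.List.slice B (some i) (some j)), i, j))
      ([], 0, 0)) =
    ((List.range t).flatMap
      (fun k => (A.drop (2^k - 1)).take (2^k) ++ (B.drop (2^k - 1)).take (2^k)),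
      (2:Int)^(t-1) - 1, (2:Int)^t - 1) := by
  induction t with
  | zero => simp
  | succ n ih =>
    rw [List.range_succ, List.map_append, List.foldl_append, ih, List.flatMap_append]
    simp only [List.foldl_cons, List.foldl_nil, List.map_cons, List.map_nil,
      List.flatMap_cons, List.flatMap_nil]
    have hone : (1:Nat) ≤ 2^n := Nat.one_le_two_pow
    have hp : (2:Nat)^(n+1) = 2^n + 2^n := by rw [pow_succ]; ring
    have hc : ((2:Int))^n = ((2^n : Nat) : Int) := by push_cast; ring
    have hc' : ((2:Int))^(n+1) = ((2^(n+1) : Nat) : Int) := by push_cast; ring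
    have h1 : (2:Int)^n - 1 = ((2^n - 1 : Nat) : Int) := by rw [hc]; omega
    have h2 : ((2^n - 1 : Nat) : Int) + 2^n = ((2^(n+1) - 1 : Nat) : Int) := by
      rw [hc]; omega
    rw [h1, h2, PySem.List.slice_natCast, PySem.List.slice_natCast]
    have h4 : 2^(n+1) - 1 - (2^n - 1) = 2^n := by omega
    rw [h4]
    simp only [Prod.mk.injEq]
    refine ⟨by simp, ?_, ?_⟩
    · rw [Nat.add_sub_cancel, ← h1]
    · rw [hc']; omega

-- B's recursion, started at width 2^j on the suffixes from position 2^j-1, produces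
-- exactly the level slices for levels j, j+1, … .
theorem combineGo_eq (n : Nat) : ∀ (j : Nat) (A B : List Int),
    combineGo (A.drop (2^j - 1)) (B.drop (2^j - 1)) (2^j) n
    = (List.range n).flatMap
        (fun k => (A.drop (2^(j+k) - 1)).take (2^(j+k)) ++ (B.drop (2^(j+k) - 1)).take (2^(j+k))) := by
  induction n with
  | zero => intro j A B; simp [combineGo]
  | succ m ih =>
    intro j A B
    have hone : (1:Nat) ≤ 2^j := Nat.one_le_two_pow
    have hp : (2:Nat)^(j+1) = 2^j + 2^j := by rw [pow_succ]; ring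
    have hd : 2^j - 1 + 2^j = 2^(j+1) - 1 := by omega
    have h2 : (2:Nat) * 2^j = 2^(j+1) := by rw [pow_succ]; ring
    rw [List.range_succ_eq_map, List.flatMap_cons, List.flatMap_map]
    simp only [combineGo, PySem.List.slice_to_natCast, PySem.List.slice_from_natCast,
      List.drop_drop, hd, h2]
    rw [ih (j+1) A B]
    have hsh : ∀ k, j + 1 + k = j + (k + 1) := fun k => by omega
    simp only [hsh, Nat.add_zero]

-- ===== VERDICT (by name: the statement is the Claim_ definition above) =====
theorem combine_heaps_spec : Claim_equal_combine_heaps := by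
  intro A B _ hpre
  have hA : 1 ≤ A.length := by
    cases A with
    | nil => exact absurd rfl hpre
    | cons a t => simp
  show combine_heaps A B = combine_heaps_alt A B
  unfold combine_heaps combine_heaps_alt
  have hn : (((A.length : Int)) - 1).natAbs = A.length - 1 := by omega
  rw [hn, size_pred_eq_clog A.length hA]
  split
  · rename_i h
    simp only [Bool.and_eq_true, beq_iff_eq] at h
    obtain ⟨ha, hb⟩ := h
    obtain ⟨a, ha'⟩ := List.length_eq_one_iff.mp ha
    obtain ⟨b, hb'⟩ := List.length_eq_one_iff.mp hb
    subst ha' hb'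
    simp [Nat.clog, combineGo, PySem.List.slice]
  · rw [combine_heaps_loop]
    have h := combineGo_eq (Nat.clog 2 A.length + 1) 0 A B
    simp only [pow_zero, Nat.sub_self, List.drop_zero, Nat.zero_add] at h
    rw [h]
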